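-- pv_equiv track=rewrite | github.com/DRMF/Seeding-Project | Azeem/src/DLMFtex2Wiki.py | modLabel
-- ===== SOURCE A (Python) =====
-- def is_number(char):
--     try:
--         "".join(["0" + str(float(char)) if float(char) < 10 else float(char)])
--         return True
--     except ValueError:
--         return False
--
-- def modLabel(label):
--     # label.replace("Formula:KLS:","KLS;")
--     isNumer = False
--     newlabel = ""
--     num = ""
--     for i in range(0, len(label)):
--         if isNumer and not is_number(label[i]):
--             if len(num) > 1:
--                 newlabel += num
--                 isNumer = False
--                 num = ""
--             else:
--                 newlabel += "0" + str(num)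
--                 num = ""
--                 isNumer = False
--         if is_number(label[i]):
--             isNumer = True
--             num += str(label[i])
--         else:
--             isNumer = False
--             newlabel += label[i]
--     if len(num) > 1:
--         newlabel += num
--     elif len(num) == 1:
--         newlabel += "0" + num
--     return (newlabel)
-- ===== SOURCE B (Python) =====
-- def is_number(char):
--     try:
--         "".join(["0" + str(float(char)) if float(char) < 10 else float(char)])
--         return True
--     except ValueError:
--         return False
--
-- def modLabel(label):
--     # run-based rewrite: find each maximal digit run with a second index,
--     # pad it with '0' when it has length 1, copy everything else verbatim
--     out = []
--     i = 0
--     n = len(label)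
--     while i < n:
--         if is_number(label[i]):
--             j = i
--             while j < n and is_number(label[j]):
--                 j += 1
--             run = label[i:j]
--             out.append("0" + run if j - i == 1 else run)
--             i = j
--         else:
--             out.append(label[i])
--             i += 1
--     return "".join(out)
-- ===== Notes on version B (the rewrite author's own statement) =====
-- stated objective: simpler
-- what changed: Replaced the per-character isNumer/num flag state machine with manual flush branches by a two-index scan over maximal digit runs: each run is sliced out at once and padded if its length is 1, non-digits are copied verbatim.
import Mathlib
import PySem

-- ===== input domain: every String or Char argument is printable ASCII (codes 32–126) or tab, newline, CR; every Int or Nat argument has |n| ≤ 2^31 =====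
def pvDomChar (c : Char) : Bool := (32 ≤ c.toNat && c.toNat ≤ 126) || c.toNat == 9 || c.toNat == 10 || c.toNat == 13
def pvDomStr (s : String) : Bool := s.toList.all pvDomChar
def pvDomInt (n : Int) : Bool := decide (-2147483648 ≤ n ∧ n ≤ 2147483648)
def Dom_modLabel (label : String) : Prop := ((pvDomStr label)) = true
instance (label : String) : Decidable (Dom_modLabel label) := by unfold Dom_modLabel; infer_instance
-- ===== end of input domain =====

-- B replaces A's per-character flag state machine by a two-index scan over maximal
-- digit runs (simpler decomposition, same O(n) cost).

-- ===== PORT A =====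
-- is_number(c) on a single ASCII character: float(c) succeeds exactly on '0'..'9'
def isNumberP (c : Char) : Bool := c.isDigit

-- loop body: state = (isNumer, newlabel, num), exactly A's branches in A's order
def modLabelStep (st : Bool × List Char × List Char) (c : Char) :
    Bool × List Char × List Char :=
  let (isNumer, newlabel, num) := st
  let (isNumer, newlabel, num) :=
    if isNumer && !(isNumberP c) then
      if num.length > 1 then (false, newlabel ++ num, ([] : List Char))
      else (false, newlabel ++ '0' :: num, ([] : List Char))
    else (isNumer, newlabel, num)
  if isNumberP c then (true, newlabel, num ++ [c])
  else (false, newlabel ++ [c], num)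

def modLabel (label : String) : String :=
  let st := label.toList.foldl modLabelStep (false, [], [])
  let newlabel := st.2.1
  let num := st.2.2
  String.mk (if num.length > 1 then newlabel ++ num
             else if num.length = 1 then newlabel ++ '0' :: num
             else newlabel)

-- ===== PORT B =====
-- "0" + run if j - i == 1 else run
def padRun (run : List Char) : List Char :=
  if run.length = 1 then '0' :: run else run

-- the outer while loop of Source B: a digit run is taken at once, others copied
def goB : List Char → List Char
  | [] => []
  | c :: rest =>
    if isNumberP c then
      padRun (c :: rest.takeWhile isNumberP) ++ goB (rest.dropWhile isNumberP)
    else c :: goB rest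
termination_by cs => cs.length
decreasing_by
  · exact Nat.lt_succ_of_le (List.length_dropWhile_le _ _)
  · simp

def modLabel_alt (label : String) : String := String.mk (goB label.toList)

-- ===== PRECONDITION & SPEC =====
def Spec_modLabel (label : String) (out : String) : Prop := out = modLabel_alt label
instance (label : String) (out : String) : Decidable (Spec_modLabel label out) := by unfold Spec_modLabel; infer_instance

-- ===== CLAIM (what is proved, stated in full; the proofs are below) =====
def Claim_equal_modLabel : Prop := ∀ (label : String), Dom_modLabel label → Spec_modLabel label (modLabel label)

-- ===== LEMMAS AND PROOFS =====

-- proof-side view of A's loop: the pending digit run `num` carried explicitly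
def pendB (num : List Char) : List Char → List Char
  | [] => padRun num
  | c :: cs =>
    if isNumberP c then pendB (num ++ [c]) cs
    else padRun num ++ c :: pendB [] cs

-- A's fold (with final flush) equals the pending-run recursion
theorem foldA_eq_pendB (cs : List Char) :
    ∀ (nl num : List Char),
      (let st := cs.foldl modLabelStep (!num.isEmpty, nl, num)
       if st.2.2.length > 1 then st.2.1 ++ st.2.2
       else if st.2.2.length = 1 then st.2.1 ++ '0' :: st.2.2
       else st.2.1) = nl ++ pendB num cs := by
  induction cs with
  | nil =>
      intro nl num
      match num with
      | [] => simp [pendB, padRun]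
      | [d] => simp [pendB, padRun]
      | d₁ :: d₂ :: ds =>
        simp only [List.foldl, pendB, padRun]
        have h1 : ¬ ((d₁ :: d₂ :: ds).length = 1) := by simp
        simp [h1]
  | cons c cs ih =>
      intro nl num
      match num with
      | [] =>
          by_cases hc : isNumberP c
          · simpa [List.foldl, modLabelStep, hc, pendB] using ih nl [c]
          · simpa [List.foldl, modLabelStep, hc, pendB, padRun] using ih (nl ++ [c]) []
      | d :: ds =>
          by_cases hc : isNumberP c
          · simpa [List.foldl, modLabelStep, hc, pendB] using ih nl (d :: ds ++ [c])
          · cases ds with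
            | nil =>
                have := ih (nl ++ '0' :: [d] ++ [c]) []
                simp [List.foldl, modLabelStep, hc, pendB, padRun] at this ⊢
                rw [this]
            | cons e es =>
                have := ih (nl ++ (d :: e :: es) ++ [c]) []
                simp [List.foldl, modLabelStep, hc, pendB, padRun] at this ⊢
                rw [this]

-- the pending-run recursion equals B's run-splitting scan
theorem pendB_eq_goB (cs : List Char) :
    (∀ num, num ≠ [] →
      pendB num cs = padRun (num ++ cs.takeWhile isNumberP) ++ goB (cs.dropWhile isNumberP))
    ∧ pendB [] cs = goB cs := by
  induction cs with
  | nil =>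
      refine ⟨fun num _ => by simp [pendB, goB], by simp [pendB, padRun, goB]⟩
  | cons c cs ih =>
      constructor
      · intro num hnum
        by_cases hc : isNumberP c
        · have := ih.1 (num ++ [c]) (by simp)
          simp only [pendB, hc, if_pos, List.takeWhile_cons_of_pos, List.dropWhile_cons_of_pos,
            List.append_assoc, List.singleton_append] at this ⊢
          simpa [hc] using this
        · simp [pendB, hc, goB, ih.2, padRun]
      · by_cases hc : isNumberP c
        · have := ih.1 [c] (by simp)
          simp only [pendB, hc, if_pos, List.nil_append, List.singleton_append] at this ⊢
          rw [this]
          simp [goB, hc]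
        · simp [pendB, hc, goB, ih.2, padRun]

-- ===== VERDICT (by name: the statement is the Claim_ definition above) =====
theorem modLabel_spec : Claim_equal_modLabel := by
  intro label _
  unfold Spec_modLabel modLabel modLabel_alt
  have h := foldA_eq_pendB label.toList [] []
  simp only [List.isEmpty_nil, Bool.not_true] at h
  simp only [h, List.nil_append, (pendB_eq_goB label.toList).2]
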